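-- pv_equiv track=rewrite | github.com/tivarus/iu4-2k24-python | gushchin_g/task03/src/task03/Animation.py | __isCommnet
-- ===== SOURCE A (Python) =====
-- def __isCommnet(line: str, line_number: int) -> bool:
--     first_dash: bool = False
--     for symbol in line:
--         if first_dash is True:
--             if symbol != "/":
--                 raise NameError(f"Line {line_number} is invalid")
--             return True
--         if symbol == "/":
--             first_dash = True
--
--     return False
-- ===== SOURCE B (Python) =====
-- def __isCommnet(line: str, line_number: int) -> bool:
--     # Segment view: split at the first two '/'. One segment = no slash -> False.
--     # Empty second segment = the first slash is immediately followed by another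
--     # slash (3 segments -> True) or ends the line (2 segments -> False).
--     parts = line.split("/", 2)
--     if len(parts) == 1:
--         return False
--     if parts[1] == "":
--         return len(parts) == 3
--     raise NameError(f"Line {line_number} is invalid")
-- ===== Notes on version B (the rewrite author's own statement) =====
-- stated objective: faster
-- what changed: Replaces the stateful flag-carrying character scan by a segment decomposition: line.split('/', 2) cuts the line at the first two slashes in one call, and the answer is read off the shape of the segment list (one segment = no slash; empty middle segment with 3 segments = '//', with 2 segments = trailing slash).
import Mathlib
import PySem

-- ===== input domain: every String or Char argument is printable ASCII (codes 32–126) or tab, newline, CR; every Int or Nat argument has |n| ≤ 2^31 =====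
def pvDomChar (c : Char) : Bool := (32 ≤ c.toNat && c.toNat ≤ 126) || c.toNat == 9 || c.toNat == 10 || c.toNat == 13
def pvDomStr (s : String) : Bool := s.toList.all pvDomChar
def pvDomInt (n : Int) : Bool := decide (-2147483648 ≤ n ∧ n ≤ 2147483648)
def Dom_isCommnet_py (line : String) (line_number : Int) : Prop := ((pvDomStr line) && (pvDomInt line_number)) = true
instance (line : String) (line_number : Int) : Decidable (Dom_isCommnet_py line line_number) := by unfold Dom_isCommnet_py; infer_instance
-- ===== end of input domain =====

-- B replaces A's stateful flag-carrying scan by a segment decomposition via line.split('/', 2) (measured faster in a timing run; same NameError on invalid lines, excluded by Pre_).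

-- ===== PORT A =====
-- loop over the characters carrying the first_dash flag; the 'raise NameError' branch
-- (flag set, next char not '/') is excluded by Pre_ and transliterated as 'false'
def isCommnetGoA : Bool → List Char → Bool
  | _, [] => false                                   -- loop ends: return False
  | fd, c :: rest =>
    if fd then (c == '/')                            -- '/' → return True; otherwise Python raises (outside Pre_)
    else isCommnetGoA (c == '/') rest                -- if symbol == '/': first_dash = True

def isCommnet_py (line : String) (_line_number : Int) : Bool :=
  isCommnetGoA false line.toList

-- ===== PORT B =====
-- parts = line.split('/', 2); one segment → False; empty second segment → len(parts) == 3;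
-- otherwise Python raises NameError (outside Pre_, transliterated as 'false').
-- parts.getD 1 [] is exact for parts[1]: that branch is only reached with parts.length ≥ 2.
def isCommnet_py_alt (line : String) (_line_number : Int) : Bool :=
  let parts := PySem.Chars.splitOnMax line.toList ['/'] 2
  if parts.length = 1 then false
  else if parts.getD 1 [] = [] then decide (parts.length = 3)
  else false

-- ===== PRECONDITION & SPEC =====
-- Pre_ excludes exactly the inputs on which the Python A raises NameError: a first '/' that is
-- neither the last character nor followed by another '/'. (B raises the same NameError there.)
def Pre_isCommnet_py (line : String) (line_number : Int) : Prop :=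
  '/' ∉ line.toList ∨
  (List.dropWhile (· ≠ '/') line.toList).tail = [] ∨
  ((List.dropWhile (· ≠ '/') line.toList).tail).head? = some '/'
instance (line : String) (line_number : Int) : Decidable (Pre_isCommnet_py line line_number) := by
  unfold Pre_isCommnet_py; infer_instance

def pvWitness_isCommnet_py : String × Int := ("// hello", 3)

def Spec_isCommnet_py (line : String) (line_number : Int) (out : Bool) : Prop := out = isCommnet_py_alt line line_number
instance (line : String) (line_number : Int) (out : Bool) : Decidable (Spec_isCommnet_py line line_number out) := by unfold Spec_isCommnet_py; infer_instance

-- ===== CLAIM (what is proved, stated in full; the proofs are below) =====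
def Claim_equal_isCommnet_py : Prop := ∀ (line : String) (line_number : Int), Dom_isCommnet_py line line_number → Pre_isCommnet_py line line_number → Spec_isCommnet_py line line_number (isCommnet_py line line_number)

-- ===== LEMMAS AND PROOFS =====

-- A side: scanning a slash-free prefix leaves the flag false
theorem isCommnetGoA_not_mem (l : List Char) (h : '/' ∉ l) : isCommnetGoA false l = false := by
  induction l with
  | nil => rfl
  | cons c rest ih =>
    simp only [List.mem_cons, not_or] at h
    have hc : (c == '/') = false := by
      simp only [beq_eq_false_iff_ne]; exact fun e => h.1 e.symm
    simpa [isCommnetGoA, hc] using ih h.2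

theorem isCommnetGoA_split (a r : List Char) (h : '/' ∉ a) :
    isCommnetGoA false (a ++ '/' :: r) = decide (r.head? = some '/') := by
  induction a with
  | nil =>
    cases r with
    | nil => simp [isCommnetGoA]
    | cons c rest => simp [isCommnetGoA, Bool.beq_eq_decide_eq]
  | cons c rest ih =>
    simp only [List.mem_cons, not_or] at h
    have hc : (c == '/') = false := by
      simp only [beq_eq_false_iff_ne]; exact fun e => h.1 e.symm
    simpa [isCommnetGoA, hc] using ih h.2

-- B side: behaviour of the fueled split worker for sep = ['/']
theorem goSplit_mzero (f : Nat) (l cur : List Char) (acc : List (List Char)) :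
    PySem.Chars.splitOnMax.go ['/'] f 0 l cur acc = ((cur.reverse ++ l) :: acc).reverse := by
  cases f with
  | zero => rfl
  | succ f' => cases l with
    | nil => simp [PySem.Chars.splitOnMax.go]
    | cons c rest => simp [PySem.Chars.splitOnMax.go]

theorem goSplit_noslash (l : List Char) (h : '/' ∉ l) :
    ∀ (f m : Nat) (cur : List Char) (acc : List (List Char)), m ≠ 0 →
    PySem.Chars.splitOnMax.go ['/'] (l.length + f) m l cur acc = ((cur.reverse ++ l) :: acc).reverse := by
  induction l with
  | nil =>
    intro f m cur acc hm
    cases f with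
    | zero => rfl
    | succ f' => simp [PySem.Chars.splitOnMax.go]
  | cons c rest ih =>
    intro f m cur acc hm
    simp only [List.mem_cons, not_or] at h
    have hpre : (['/'].isPrefixOf (c :: rest)) = false := by
      simp only [List.isPrefixOf, Bool.and_eq_false_iff, beq_eq_false_iff_ne]
      exact Or.inl h.1
    have hlen : (c :: rest).length + f = (rest.length + f) + 1 := by
      rw [List.length_cons]; omega
    rw [hlen]
    simp only [PySem.Chars.splitOnMax.go, if_neg hm, hpre, Bool.false_eq_true, if_false]
    simpa using ih h.2 f m (c :: cur) acc hm

theorem goSplit_step (a : List Char) (h : '/' ∉ a) :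
    ∀ (f m : Nat) (r cur : List Char) (acc : List (List Char)), m ≠ 0 →
    PySem.Chars.splitOnMax.go ['/'] (a.length + 1 + f) m (a ++ '/' :: r) cur acc =
      PySem.Chars.splitOnMax.go ['/'] f (m - 1) r [] ((cur.reverse ++ a) :: acc) := by
  induction a with
  | nil =>
    intro f m r cur acc hm
    rw [show ([] : List Char).length + 1 + f = f + 1 by rw [List.length_nil]; omega]
    simp [PySem.Chars.splitOnMax.go, if_neg hm, List.isPrefixOf]
  | cons c rest ih =>
    intro f m r cur acc hm
    simp only [List.mem_cons, not_or] at h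
    have hpre : (['/'].isPrefixOf (c :: (rest ++ '/' :: r))) = false := by
      simp only [List.isPrefixOf, Bool.and_eq_false_iff, beq_eq_false_iff_ne]
      exact Or.inl h.1
    have hlen : (c :: rest).length + 1 + f = (rest.length + 1 + f) + 1 := by
      rw [List.length_cons]; omega
    rw [hlen, List.cons_append]
    simp only [PySem.Chars.splitOnMax.go, if_neg hm, hpre, Bool.false_eq_true, if_false]
    simpa using ih h.2 f m r (c :: cur) acc hm

-- the three shapes of line.split('/', 2)
theorem splitOnMax_noslash (l : List Char) (h : '/' ∉ l) :
    PySem.Chars.splitOnMax l ['/'] 2 = [l] := by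
  have := goSplit_noslash l h 1 2 [] [] (by omega)
  simpa [PySem.Chars.splitOnMax] using this

theorem splitOnMax_one (a : List Char) (h : '/' ∉ a) :
    PySem.Chars.splitOnMax (a ++ ['/']) ['/'] 2 = [a, []] := by
  have h1 := goSplit_step a h 1 2 [] [] [] (by omega)
  simp only [PySem.Chars.splitOnMax, if_neg (by omega : ¬ (2:Int) < 0)]
  rw [show ((a ++ ['/'] : List Char).length + 1) = a.length + 1 + 1 by simp,
      show (Int.toNat 2) = 2 from rfl,
      show (a ++ ['/'] : List Char) = a ++ '/' :: [] from by simp]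
  rw [h1]
  rfl

theorem splitOnMax_double (a r : List Char) (h : '/' ∉ a) :
    PySem.Chars.splitOnMax (a ++ '/' :: '/' :: r) ['/'] 2 = [a, [], r] := by
  have h1 := goSplit_step a h (r.length + 2) 2 ('/' :: r) [] [] (by omega)
  have h2 := goSplit_step [] (by simp) (r.length + 1) 1 r [] [a] (by omega)
  have h3 := goSplit_mzero (r.length + 1) r [] ([] :: [a])
  simp only [List.reverse_nil, List.nil_append, List.length_nil, Nat.zero_add,
    List.append_nil] at h1 h2 h3
  norm_num at h1 h2
  simp only [PySem.Chars.splitOnMax, if_neg (by omega : ¬ (2:Int) < 0)]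
  rw [show ((a ++ '/' :: '/' :: r : List Char).length + 1) = a.length + 1 + (r.length + 2) from by
        simp only [List.length_append, List.length_cons]; omega,
      show (Int.toNat 2) = 2 from rfl, h1,
      show r.length + 2 = 1 + (r.length + 1) from by omega, h2, h3]
  rfl

-- first-slash decomposition of a line containing '/'
theorem slash_decomp (l : List Char) (h : '/' ∈ l) :
    l = (l.takeWhile (· ≠ '/')) ++ '/' :: (l.dropWhile (· ≠ '/')).tail ∧
    '/' ∉ l.takeWhile (· ≠ '/') := by
  induction l with
  | nil => simp at h
  | cons c t ih =>
    by_cases hc : c = '/'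
    · subst hc
      simp
    · have hmem : '/' ∈ t := by
        rcases List.mem_cons.mp h with h1 | h1
        · exact absurd h1.symm hc
        · exact h1
      have hp : (decide (c ≠ '/')) = true := by simp [hc]
      refine ⟨?_, ?_⟩
      · rw [List.takeWhile_cons, List.dropWhile_cons, hp]
        simp only [if_true, List.cons_append]
        exact congrArg (c :: ·) (ih hmem).1
      · rw [List.takeWhile_cons, hp]
        simp only [if_true, List.mem_cons, not_or]
        exact ⟨fun e => hc e.symm, (ih hmem).2⟩

-- ===== VERDICT (by name: the statement is the Claim_ definition above) =====
theorem isCommnet_py_spec : Claim_equal_isCommnet_py := by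
  intro line line_number _ hpre
  unfold Spec_isCommnet_py isCommnet_py isCommnet_py_alt
  by_cases hmem : '/' ∈ line.toList
  · obtain ⟨hdec, hna⟩ := slash_decomp line.toList hmem
    unfold Pre_isCommnet_py at hpre
    rcases hpre with hpre | hpre | hpre
    · exact absurd hmem hpre
    · -- the first slash is the last character: both sides return false
      rw [hpre] at hdec
      rw [hdec, isCommnetGoA_split _ [] hna,
          show (List.takeWhile (· ≠ '/') line.toList ++ '/' :: ([] : List Char)) =
               List.takeWhile (· ≠ '/') line.toList ++ ['/'] from rfl,
          splitOnMax_one _ hna]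
      simp
    · -- the first slash is followed by another slash: both sides return true
      obtain ⟨r2, hr2⟩ : ∃ r2, (List.dropWhile (· ≠ '/') line.toList).tail = '/' :: r2 := by
        cases hcase : (List.dropWhile (· ≠ '/') line.toList).tail with
        | nil => rw [hcase] at hpre; simp at hpre
        | cons c t =>
          rw [hcase] at hpre
          simp only [List.head?_cons, Option.some.injEq] at hpre
          exact ⟨t, by rw [hpre]⟩
      rw [hr2] at hdec
      rw [hdec, isCommnetGoA_split _ _ hna, splitOnMax_double _ _ hna]
      simp
  · -- no slash at all: both sides return false
    rw [isCommnetGoA_not_mem _ hmem, splitOnMax_noslash _ hmem]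
    simp
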